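-- pv_equiv track=rewrite | github.com/Siromanec/project3_game_tetris | player1.py | generate_possible_coords
-- ===== SOURCE A (Python) =====
-- from typing import List
--
-- def generate_possible_coords(point_coords:tuple, piece_size:tuple, plateau_size:tuple, coords_set_friend: List[tuple], vertical, horizontal, figure_coords)->dict:
--     """
--     generates all possible moves at a certain point
--     :param tuple point_coords:
--     :param tuple piece_size:
--
--     :return dict
--
--     """
--
--     #grid_height =  [x for x in range(vertical[0]+1)]
--     #grid_length =  [x for x in range(horizontal[0]+1)]
--     #grid_height.reverse()
--     #grid_length.reverse()
--     ##debug(f"h: {grid_height}")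
--     ##debug(f"l: {grid_length}")
--     ##debug(f"v: {vertical}")
--     ##debug(f"h: {horizontal}")
--     ##debug(f"c: {figure_coords}")
--     #projection = set()
--     ##fix looped index or find another way to rotate
--     #for i in figure_coords:
--     #    length, height = i
--     #    #debug(f"{grid_height}, {[height]}")
--     #    #debug(f"{grid_length}, {[length]}")
--     #    half_rotation = grid_height[height], grid_length[length]
--     #    relative_coords = point_coords[0] - half_rotation[0], point_coords[1] - half_rotation[1]
--     #    if relative_coords[0] +vertical[1]-1 > 0 and relative_coords[1] + horizontal[1] -1 > 0:
--     #        projection.add(relative_coords)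
--     #
--     #return projection
--     #
--     plateau_height, plateau_length = plateau_size
--     posible_coords = set()
--     main_height = point_coords[0]
--     main_length = point_coords[1]
--     ###if 0 in point_coords or plateau_height or plateau_length in point_coords:
--     ###    return set()
--     surrounding = ((main_height + 1, main_length + 1),
--                    (main_height + 1, main_length - 1),
--                    (main_height + 1, main_length + 0),
--                    (main_height + 0, main_length + 1),
--                    (main_height + 0, main_length - 1),
--                    (main_height + 1, main_length + 0),
--                    (main_height - 1, main_length - 1),
--                    (main_height - 1, main_length + 1))
--     count = 0
--     for i in surrounding:
--         if i in coords_set_friend: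
--             count += 1
--     if count == 8:
--         return set()
--     #
--     for height in range(abs(horizontal[1]-horizontal[0])+1):
--
--         for length in range(abs(vertical[1]-vertical[0])+1):
--
--             minus_height = main_height - height - horizontal[0]
--             plus_height = main_height + height - horizontal[0]
--             minus_length = main_length - length - vertical[0]
--             plus_length = main_length + length - vertical[0]
--
--             if plateau_height - piece_size[0] -1 > plus_height and plateau_length - piece_size[1] -1 > plus_length:
--                 posible_coords.add((plus_height, plus_length))
--
--             if plateau_length - piece_size[1] -1> plus_length and minus_height -1> 0:
--                 posible_coords.add((minus_height, plus_length))
--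
--             if plateau_height - piece_size[0] -1 > plus_height and minus_length -2> 0:
--                 posible_coords.add((plus_height, minus_length))
--
--             if minus_height - 1> 0 and minus_length -2 > 0:
--                 posible_coords.add((minus_height, minus_length))
--     #debug(point_coords)
--     #debug(posible_coords)
--     return posible_coords
-- ===== SOURCE B (Python) =====
-- def generate_possible_coords(point_coords, piece_size, plateau_size, coords_set_friend, vertical, horizontal, figure_coords):
--     main_height, main_length = point_coords[0], point_coords[1]
--     surrounding = ((main_height + 1, main_length + 1),
--                    (main_height + 1, main_length - 1),
--                    (main_height + 1, main_length + 0),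
--                    (main_height + 0, main_length + 1),
--                    (main_height + 0, main_length - 1),
--                    (main_height + 1, main_length + 0),
--                    (main_height - 1, main_length - 1),
--                    (main_height - 1, main_length + 1))
--     if all(p in coords_set_friend for p in surrounding):
--         return set()
--
--     hcap = plateau_size[0] - piece_size[0] - 1
--     lcap = plateau_size[1] - piece_size[1] - 1
--     hbase = main_height - horizontal[0]
--     hspan = abs(horizontal[1] - horizontal[0])
--     lbase = main_length - vertical[0]
--     lspan = abs(vertical[1] - vertical[0])
--
--     def axis_levels(base, span, cap, lo):
--         # per-offset levels of reachable valid values, clipped by closed-form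
--         # thresholds: base+d valid iff d <= plus_top, base-d valid iff d <= minus_top
--         plus_top = min(span, cap - 1 - base)
--         minus_top = min(span, base - lo)
--         both = min(plus_top, minus_top)
--         levels = [[base]] if max(plus_top, minus_top) >= 0 else []
--         for d in range(1, both + 1):
--             levels.append([base + d, base - d])
--         for d in range(max(both, 0) + 1, plus_top + 1):
--             levels.append([base + d])
--         for d in range(max(both, 0) + 1, minus_top + 1):
--             levels.append([base - d])
--         return levels
--
--     ys = [y for row in axis_levels(lbase, lspan, lcap, 3) for y in row]
--     out = []
--     for hrow in axis_levels(hbase, hspan, hcap, 2):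
--         out.extend((x, y) for y in ys for x in hrow)
--     return set(out)
-- ===== Notes on version B (the rewrite author's own statement) =====
-- stated objective: alternative
-- what changed: B deletes A's double loop with four per-cell boundary checks: it computes closed-form clipping thresholds per axis (plus_top/minus_top/both), builds each axis's valid values as three unconditional arithmetic zones, and emits the Cartesian product of the two axis structures directly (every emitted pair is valid and distinct, so no per-pair test and no set-dedup work).
import Mathlib
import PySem

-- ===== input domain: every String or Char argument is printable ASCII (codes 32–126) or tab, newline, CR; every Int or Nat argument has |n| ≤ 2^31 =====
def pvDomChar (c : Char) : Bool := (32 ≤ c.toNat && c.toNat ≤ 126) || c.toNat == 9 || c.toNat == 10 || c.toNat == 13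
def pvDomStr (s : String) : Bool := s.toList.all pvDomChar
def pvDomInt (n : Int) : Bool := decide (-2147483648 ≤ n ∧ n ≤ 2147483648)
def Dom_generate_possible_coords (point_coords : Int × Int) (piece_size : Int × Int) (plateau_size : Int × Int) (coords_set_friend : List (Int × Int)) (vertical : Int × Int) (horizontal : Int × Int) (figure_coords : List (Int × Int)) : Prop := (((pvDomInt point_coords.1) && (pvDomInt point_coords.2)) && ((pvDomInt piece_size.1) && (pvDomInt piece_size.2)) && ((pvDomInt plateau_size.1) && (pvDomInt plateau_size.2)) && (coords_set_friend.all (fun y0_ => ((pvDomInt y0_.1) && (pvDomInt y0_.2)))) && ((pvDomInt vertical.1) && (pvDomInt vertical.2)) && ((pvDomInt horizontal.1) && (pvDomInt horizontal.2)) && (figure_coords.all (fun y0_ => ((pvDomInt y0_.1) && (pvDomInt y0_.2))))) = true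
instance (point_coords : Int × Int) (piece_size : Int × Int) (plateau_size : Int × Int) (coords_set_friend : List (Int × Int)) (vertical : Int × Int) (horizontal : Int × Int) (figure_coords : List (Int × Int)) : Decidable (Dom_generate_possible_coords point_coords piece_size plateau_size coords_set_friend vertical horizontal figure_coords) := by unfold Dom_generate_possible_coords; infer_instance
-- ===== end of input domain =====

-- B replaces A's double grid loop (four boundary checks per cell) by closed-form per-axis
-- clipping thresholds: each axis's valid values are built as three unconditional arithmetic
-- zones and the result is the Cartesian product of the two axis structures; same exact result.

-- ===== PORT A =====
-- literal transliteration of A: count surrounding friends, early return, then the double range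
-- loop with four conditional set-adds per cell (the four inequalities recomputed every cell)
def generate_possible_coords (point_coords : Int × Int) (piece_size : Int × Int) (plateau_size : Int × Int) (coords_set_friend : List (Int × Int)) (vertical : Int × Int) (horizontal : Int × Int) (figure_coords : List (Int × Int)) : List (Int × Int) :=
  let plateau_height := plateau_size.1
  let plateau_length := plateau_size.2
  let main_height := point_coords.1
  let main_length := point_coords.2
  let surrounding : List (Int × Int) :=
    [(main_height + 1, main_length + 1), (main_height + 1, main_length - 1),
     (main_height + 1, main_length + 0), (main_height + 0, main_length + 1),
     (main_height + 0, main_length - 1), (main_height + 1, main_length + 0),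
     (main_height - 1, main_length - 1), (main_height - 1, main_length + 1)]
  let count : Int := surrounding.foldl (fun c i => if coords_set_friend.contains i then c + 1 else c) 0
  if count = 8 then PySem.Set.empty
  else
    (PySem.List.pyRange 0 (((horizontal.2 - horizontal.1).natAbs : Int) + 1) 1).foldl (fun s height =>
      (PySem.List.pyRange 0 (((vertical.2 - vertical.1).natAbs : Int) + 1) 1).foldl (fun s length =>
        let minus_height := main_height - height - horizontal.1
        let plus_height := main_height + height - horizontal.1
        let minus_length := main_length - length - vertical.1
        let plus_length := main_length + length - vertical.1
        let s := if plateau_height - piece_size.1 - 1 > plus_height ∧ plateau_length - piece_size.2 - 1 > plus_length then PySem.Set.add s (plus_height, plus_length) else s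
        let s := if plateau_length - piece_size.2 - 1 > plus_length ∧ minus_height - 1 > 0 then PySem.Set.add s (minus_height, plus_length) else s
        let s := if plateau_height - piece_size.1 - 1 > plus_height ∧ minus_length - 2 > 0 then PySem.Set.add s (plus_height, minus_length) else s
        let s := if minus_height - 1 > 0 ∧ minus_length - 2 > 0 then PySem.Set.add s (minus_height, minus_length) else s
        s) s) PySem.Set.empty

-- ===== PORT B =====
-- helper of Source B: per-offset levels of valid axis values, clipped by closed-form thresholds
-- (base+d valid iff d ≤ plus_top, base-d valid iff d ≤ minus_top), built as three zones
def pvAxisLevels (base span cap lo : Int) : List (List Int) :=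
  let plus_top := min span (cap - 1 - base)
  let minus_top := min span (base - lo)
  let both := min plus_top minus_top
  let levels : List (List Int) := if max plus_top minus_top ≥ 0 then [[base]] else []
  let levels := levels ++ (PySem.List.pyRange 1 (both + 1) 1).map (fun d => [base + d, base - d])
  let levels := levels ++ (PySem.List.pyRange (max both 0 + 1) (plus_top + 1) 1).map (fun d => [base + d])
  let levels := levels ++ (PySem.List.pyRange (max both 0 + 1) (minus_top + 1) 1).map (fun d => [base - d])
  levels

-- literal transliteration of Source B: all(...) early return, then axis_levels per axis,
-- ys = flattened length-axis levels, out = product emission, set(out)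
def generate_possible_coords_alt (point_coords : Int × Int) (piece_size : Int × Int) (plateau_size : Int × Int) (coords_set_friend : List (Int × Int)) (vertical : Int × Int) (horizontal : Int × Int) (figure_coords : List (Int × Int)) : List (Int × Int) :=
  let main_height := point_coords.1
  let main_length := point_coords.2
  let surrounding : List (Int × Int) :=
    [(main_height + 1, main_length + 1), (main_height + 1, main_length - 1),
     (main_height + 1, main_length + 0), (main_height + 0, main_length + 1),
     (main_height + 0, main_length - 1), (main_height + 1, main_length + 0),
     (main_height - 1, main_length - 1), (main_height - 1, main_length + 1)]
  if surrounding.all (fun p => coords_set_friend.contains p) then PySem.Set.empty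
  else
    let hcap := plateau_size.1 - piece_size.1 - 1
    let lcap := plateau_size.2 - piece_size.2 - 1
    let hbase := main_height - horizontal.1
    let hspan : Int := ((horizontal.2 - horizontal.1).natAbs : Int)
    let lbase := main_length - vertical.1
    let lspan : Int := ((vertical.2 - vertical.1).natAbs : Int)
    let ys := (pvAxisLevels lbase lspan lcap 3).flatMap id
    let out := (pvAxisLevels hbase hspan hcap 2).foldl
      (fun acc hrow => acc ++ ys.flatMap (fun y => hrow.map (fun x => (x, y)))) []
    PySem.Set.ofList out

-- ===== PRECONDITION & SPEC =====
def Spec_generate_possible_coords (point_coords : Int × Int) (piece_size : Int × Int) (plateau_size : Int × Int) (coords_set_friend : List (Int × Int)) (vertical : Int × Int) (horizontal : Int × Int) (figure_coords : List (Int × Int)) (out : List (Int × Int)) : Prop := out = generate_possible_coords_alt point_coords piece_size plateau_size coords_set_friend vertical horizontal figure_coords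
instance (point_coords : Int × Int) (piece_size : Int × Int) (plateau_size : Int × Int) (coords_set_friend : List (Int × Int)) (vertical : Int × Int) (horizontal : Int × Int) (figure_coords : List (Int × Int)) (out : List (Int × Int)) : Decidable (Spec_generate_possible_coords point_coords piece_size plateau_size coords_set_friend vertical horizontal figure_coords out) := by unfold Spec_generate_possible_coords; infer_instance

-- ===== CLAIM (what is proved, stated in full; the proofs are below) =====
def Claim_equal_generate_possible_coords : Prop := ∀ (point_coords : Int × Int) (piece_size : Int × Int) (plateau_size : Int × Int) (coords_set_friend : List (Int × Int)) (vertical : Int × Int) (horizontal : Int × Int) (figure_coords : List (Int × Int)), Dom_generate_possible_coords point_coords piece_size plateau_size coords_set_friend vertical horizontal figure_coords → Spec_generate_possible_coords point_coords piece_size plateau_size coords_set_friend vertical horizontal figure_coords (generate_possible_coords point_coords piece_size plateau_size coords_set_friend vertical horizontal figure_coords)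

-- ===== LEMMAS AND PROOFS =====

-- canonical filtered row of valid values at offset d of an axis
def pvRow (base cap lo d : Int) : List Int :=
  (if base + d < cap then [base + d] else []) ++ (if lo ≤ base - d then [base - d] else [])

-- fold step shared by both sides: insert one row's product with ys into the set
def pvStep (ys : List Int) (s : List (Int × Int)) (row : List Int) : List (Int × Int) :=
  List.foldl PySem.Set.add s (ys.flatMap (fun y => row.map (fun x => (x, y))))

-- one grid cell of A: the chain of four conditional adds is the Set.add-fold of the
-- product of the two filtered axis rows (y outer, x inner — A's PP,MP,PM,MM order)
theorem pv_cell (s : List (Int × Int)) (xp xm yp ym hc lc : Int) :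
    (let s1 := if hc > xp ∧ lc > yp then PySem.Set.add s (xp, yp) else s
     let s2 := if lc > yp ∧ xm - 1 > 0 then PySem.Set.add s1 (xm, yp) else s1
     let s3 := if hc > xp ∧ ym - 2 > 0 then PySem.Set.add s2 (xp, ym) else s2
     if xm - 1 > 0 ∧ ym - 2 > 0 then PySem.Set.add s3 (xm, ym) else s3)
    = List.foldl PySem.Set.add s
        (((if yp < lc then [yp] else []) ++ (if 3 ≤ ym then [ym] else [])).flatMap
          (fun y => ((if xp < hc then [xp] else []) ++ (if 2 ≤ xm then [xm] else [])).map
            (fun x => (x, y)))) := by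
  have e1 : (xm - 1 > 0) = (2 ≤ xm) := propext (by omega)
  have e2 : (ym - 2 > 0) = (3 ≤ ym) := propext (by omega)
  have e3 : (hc > xp) = (xp < hc) := propext (by omega)
  have e4 : (lc > yp) = (yp < lc) := propext (by omega)
  simp only [e1, e2, e3, e4]
  by_cases ha : xp < hc <;> by_cases hb : 2 ≤ xm <;>
    by_cases hcc : yp < lc <;> by_cases hd : 3 ≤ ym <;>
      simp [ha, hb, hcc, hd, List.flatMap_cons]

-- folding Set.add over elements already present changes nothing
theorem pv_absorb (t l : List (Int × Int)) (h : ∀ a ∈ l, a ∈ t) :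
    List.foldl PySem.Set.add t l = t := by
  induction l generalizing t with
  | nil => rfl
  | cons a l ih =>
      simp only [List.foldl_cons]
      rw [PySem.Set.add_of_mem (h a (by simp))]
      exact ih t (fun b hb => h b (by simp [hb]))

theorem pv_fold_fold (s l : List (Int × Int)) :
    List.foldl PySem.Set.add (List.foldl PySem.Set.add s l) l = List.foldl PySem.Set.add s l := by
  apply pv_absorb
  intro a ha
  have := PySem.Set.mem_foldl_add (l := l) (f := id) (s := s) (y := a)
  simp only [id] at this
  exact this.mpr (Or.inr ⟨a, ha, rfl⟩)

-- a duplicated singleton row: per y the adjacent duplicate add is redundant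
theorem pv_dup_row (s : List (Int × Int)) (ys : List Int) (x : Int) :
    List.foldl PySem.Set.add s (ys.flatMap (fun y => [(x, y), (x, y)]))
      = List.foldl PySem.Set.add s (ys.flatMap (fun y => [(x, y)])) := by
  induction ys generalizing s with
  | nil => rfl
  | cons y ys ih =>
      simp only [List.flatMap_cons, List.foldl_append, List.foldl_cons, List.foldl_nil]
      rw [PySem.Set.add_of_mem (by simp [PySem.Set.mem_add])]
      exact ih _

-- zone characterisation: the nonempty rows at offsets 1..span are exactly the three zones
theorem pv_zones (base cap lo span pt mt both : Int) (hs : 0 ≤ span)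
    (hpt : pt = min span (cap - 1 - base)) (hmt : mt = min span (base - lo))
    (hb : both = min pt mt) :
    ((PySem.List.pyRange 1 (span + 1) 1).map (pvRow base cap lo)).filter (fun r => !r.isEmpty)
      = (PySem.List.pyRange 1 (both + 1) 1).map (fun d => [base + d, base - d])
        ++ ((PySem.List.pyRange (max both 0 + 1) (pt + 1) 1).map (fun d => [base + d])
        ++ (PySem.List.pyRange (max both 0 + 1) (mt + 1) 1).map (fun d => [base - d])) := by
  rw [PySem.List.pyRange_one_append 1 (max both 0 + 1) (span + 1) (by omega) (by omega),
      PySem.List.pyRange_one_append (max both 0 + 1) (max (max pt mt) 0 + 1) (span + 1)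
        (by omega) (by omega)]
  rw [List.map_append, List.map_append, List.filter_append, List.filter_append]
  have seg1 : ((PySem.List.pyRange 1 (max both 0 + 1) 1).map (pvRow base cap lo)).filter
      (fun r => !r.isEmpty) = (PySem.List.pyRange 1 (both + 1) 1).map (fun d => [base + d, base - d]) := by
    by_cases h0 : 0 ≤ both
    · have hm : max both 0 + 1 = both + 1 := by omega
      have hmap : (PySem.List.pyRange 1 (both + 1) 1).map (pvRow base cap lo)
          = (PySem.List.pyRange 1 (both + 1) 1).map (fun d => [base + d, base - d]) :=
        List.map_congr_left (fun d hd => by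
          rw [PySem.List.mem_pyRange_one] at hd
          unfold pvRow
          rw [if_pos (by omega), if_pos (by omega)]; rfl)
      rw [hm, hmap]
      simp [List.filter_map, Function.comp_def]
    · rw [PySem.List.pyRange_one_eq_nil (by omega), PySem.List.pyRange_one_eq_nil (by omega)]
      rfl
  have seg3 : ((PySem.List.pyRange (max (max pt mt) 0 + 1) (span + 1) 1).map
      (pvRow base cap lo)).filter (fun r => !r.isEmpty) = [] := by
    have hmap : (PySem.List.pyRange (max (max pt mt) 0 + 1) (span + 1) 1).map (pvRow base cap lo)
        = (PySem.List.pyRange (max (max pt mt) 0 + 1) (span + 1) 1).map (fun _ => ([] : List Int)) :=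
      List.map_congr_left (fun d hd => by
        rw [PySem.List.mem_pyRange_one] at hd
        unfold pvRow
        rw [if_neg (by omega), if_neg (by omega)]; rfl)
    rw [hmap]
    simp
  have seg2 : ((PySem.List.pyRange (max both 0 + 1) (max (max pt mt) 0 + 1) 1).map
      (pvRow base cap lo)).filter (fun r => !r.isEmpty)
      = (PySem.List.pyRange (max both 0 + 1) (pt + 1) 1).map (fun d => [base + d])
        ++ (PySem.List.pyRange (max both 0 + 1) (mt + 1) 1).map (fun d => [base - d]) := by
    by_cases hcase : mt ≤ pt
    · rw [PySem.List.pyRange_one_eq_nil (a := max both 0 + 1) (b := mt + 1) (by omega)]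
      rw [List.map_nil, List.append_nil]
      by_cases h0 : 0 ≤ pt
      · have hm : max (max pt mt) 0 + 1 = pt + 1 := by omega
        have hmap : (PySem.List.pyRange (max both 0 + 1) (pt + 1) 1).map (pvRow base cap lo)
            = (PySem.List.pyRange (max both 0 + 1) (pt + 1) 1).map (fun d => [base + d]) :=
          List.map_congr_left (fun d hd => by
            rw [PySem.List.mem_pyRange_one] at hd
            unfold pvRow
            rw [if_pos (by omega), if_neg (by omega), List.append_nil])
        rw [hm, hmap]
        simp [List.filter_map, Function.comp_def]
      · rw [PySem.List.pyRange_one_eq_nil (by omega), PySem.List.pyRange_one_eq_nil (by omega)]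
        rfl
    · rw [PySem.List.pyRange_one_eq_nil (a := max both 0 + 1) (b := pt + 1) (by omega)]
      rw [List.map_nil, List.nil_append]
      by_cases h0 : 0 ≤ mt
      · have hm : max (max pt mt) 0 + 1 = mt + 1 := by omega
        have hmap : (PySem.List.pyRange (max both 0 + 1) (mt + 1) 1).map (pvRow base cap lo)
            = (PySem.List.pyRange (max both 0 + 1) (mt + 1) 1).map (fun d => [base - d]) :=
          List.map_congr_left (fun d hd => by
            rw [PySem.List.mem_pyRange_one] at hd
            unfold pvRow
            rw [if_neg (by omega), if_pos (by omega), List.nil_append])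
        rw [hm, hmap]
        simp [List.filter_map, Function.comp_def]
      · rw [PySem.List.pyRange_one_eq_nil (by omega), PySem.List.pyRange_one_eq_nil (by omega)]
        rfl
  rw [seg1, seg2, seg3, List.append_nil]

-- dropping empty rows does not change a fold whose step ignores them …
theorem pv_foldl_filter_empty {S : Type} (g : S → List Int → S) (hg : ∀ s, g s [] = s)
    (l : List (List Int)) (s : S) :
    List.foldl g s (l.filter (fun r => !r.isEmpty)) = List.foldl g s l := by
  induction l generalizing s with
  | nil => rfl
  | cons r l ih =>
      cases r with
      | nil => simpa [hg] using ih s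
      | cons a r => simpa using ih (g s (a :: r))

-- … nor a flattening
theorem pv_flatten_filter_empty (l : List (List Int)) :
    (l.filter (fun r => !r.isEmpty)).flatMap id = l.flatMap id := by
  induction l with
  | nil => rfl
  | cons r l ih => cases r <;> simp [ih]

theorem pv_step_nil (ys : List Int) (s : List (Int × Int)) : pvStep ys s [] = s := by
  simp [pvStep, List.flatMap]

theorem pv_step_dup (ys : List Int) (s : List (Int × Int)) (x : Int) :
    pvStep ys s [x, x] = pvStep ys s [x] := by
  unfold pvStep
  simpa using pv_dup_row s ys x

-- the ordered fold over all offsets 0..span of the filtered rows equals the fold over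
-- B's zone-built level list, for any step that ignores empty rows and duplicate singletons
theorem pv_axis_fold {S : Type} (g : S → List Int → S) (hnil : ∀ s, g s [] = s)
    (hdup : ∀ s x, g s [x, x] = g s [x])
    (base cap lo span : Int) (hs : 0 ≤ span) (s : S) :
    List.foldl (fun s d => g s (pvRow base cap lo d)) s (PySem.List.pyRange 0 (span + 1) 1)
      = List.foldl g s (pvAxisLevels base span cap lo) := by
  have hlev : pvAxisLevels base span cap lo
      = (if max (min span (cap - 1 - base)) (min span (base - lo)) ≥ 0 then [[base]] else [])
        ++ ((PySem.List.pyRange 1 (min (min span (cap - 1 - base)) (min span (base - lo)) + 1) 1).map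
              (fun d => [base + d, base - d])
          ++ ((PySem.List.pyRange (max (min (min span (cap - 1 - base)) (min span (base - lo))) 0 + 1)
                (min span (cap - 1 - base) + 1) 1).map (fun d => [base + d])
          ++ (PySem.List.pyRange (max (min (min span (cap - 1 - base)) (min span (base - lo))) 0 + 1)
                (min span (base - lo) + 1) 1).map (fun d => [base - d]))) := by
    unfold pvAxisLevels
    simp only [List.append_assoc]
  have htail : ∀ t : S,
      List.foldl (fun s d => g s (pvRow base cap lo d)) t (PySem.List.pyRange 1 (span + 1) 1)
      = List.foldl g t
        ((PySem.List.pyRange 1 (min (min span (cap - 1 - base)) (min span (base - lo)) + 1) 1).map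
            (fun d => [base + d, base - d])
          ++ ((PySem.List.pyRange (max (min (min span (cap - 1 - base)) (min span (base - lo))) 0 + 1)
                (min span (cap - 1 - base) + 1) 1).map (fun d => [base + d])
          ++ (PySem.List.pyRange (max (min (min span (cap - 1 - base)) (min span (base - lo))) 0 + 1)
                (min span (base - lo) + 1) 1).map (fun d => [base - d]))) := by
    intro t
    rw [← List.foldl_map (f := pvRow base cap lo) (g := g),
        ← pv_foldl_filter_empty g hnil,
        pv_zones base cap lo span _ _ _ hs rfl rfl rfl]
  have hhead : g s (pvRow base cap lo 0)
      = List.foldl g s (if max (min span (cap - 1 - base)) (min span (base - lo)) ≥ 0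
          then [[base]] else []) := by
    unfold pvRow
    simp only [add_zero, sub_zero]
    by_cases h1 : base < cap <;> by_cases h2 : lo ≤ base
    · rw [if_pos h1, if_pos h2,
          if_pos (show max (min span (cap - 1 - base)) (min span (base - lo)) ≥ 0 by omega)]
      simpa using hdup s base
    · rw [if_pos h1, if_neg h2,
          if_pos (show max (min span (cap - 1 - base)) (min span (base - lo)) ≥ 0 by omega)]
      simp
    · rw [if_neg h1, if_pos h2,
          if_pos (show max (min span (cap - 1 - base)) (min span (base - lo)) ≥ 0 by omega)]
      simp
    · rw [if_neg h1, if_neg h2,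
          if_neg (show ¬ max (min span (cap - 1 - base)) (min span (base - lo)) ≥ 0 by omega)]
      simp [hnil]
  rw [PySem.List.pyRange_one_cons (by omega), List.foldl_cons,
      show (0 : Int) + 1 = 1 from rfl, htail (g s (pvRow base cap lo 0)), hhead,
      ← List.foldl_append, hlev]

-- folding rows with the ys list carrying its level-0 duplicate is the same as with it deduplicated
theorem pv_ys_step (base cap lo : Int) (T : List Int) (row : List Int) (s : List (Int × Int)) :
    pvStep (((if base < cap then [base] else []) ++ (if lo ≤ base then [base] else [])) ++ T) s row
      = pvStep ((if (base < cap ∨ lo ≤ base) then [base] else []) ++ T) s row := by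
  by_cases h1 : base < cap <;> by_cases h2 : lo ≤ base <;>
    simp only [pvStep, h1, h2, if_pos, if_neg, if_true, if_false, or_true, true_or, or_self,
      ite_true, ite_false, not_false_iff, List.nil_append, List.append_nil, List.cons_append,
      List.singleton_append, List.flatMap_cons, List.flatMap_append, List.foldl_append] <;>
    simp [h1, h2, pv_fold_fold, List.foldl_append]

-- ===== VERDICT (by name: the statement is the Claim_ definition above) =====
theorem generate_possible_coords_spec : Claim_equal_generate_possible_coords := by
  intro pc ps pl csf v h fc _
  unfold Spec_generate_possible_coords generate_possible_coords generate_possible_coords_alt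
  simp only []
  rw [PySem.List.foldl_count_if csf.contains]
  have hall : ((0 : Int) + (List.countP csf.contains
      ([(pc.1 + 1, pc.2 + 1), (pc.1 + 1, pc.2 - 1), (pc.1 + 1, pc.2 + 0), (pc.1 + 0, pc.2 + 1),
       (pc.1 + 0, pc.2 - 1), (pc.1 + 1, pc.2 + 0), (pc.1 - 1, pc.2 - 1), (pc.1 - 1, pc.2 + 1)] : List (Int × Int)) : Int) = 8)
      ↔ ([(pc.1 + 1, pc.2 + 1), (pc.1 + 1, pc.2 - 1), (pc.1 + 1, pc.2 + 0), (pc.1 + 0, pc.2 + 1),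
       (pc.1 + 0, pc.2 - 1), (pc.1 + 1, pc.2 + 0), (pc.1 - 1, pc.2 - 1), (pc.1 - 1, pc.2 + 1)] : List (Int × Int)).all
        (fun c => csf.contains c) = true := by
    rw [List.all_eq_true, ← List.countP_eq_length]
    have hle := List.countP_le_length (l := ([(pc.1 + 1, pc.2 + 1), (pc.1 + 1, pc.2 - 1), (pc.1 + 1, pc.2 + 0), (pc.1 + 0, pc.2 + 1),
       (pc.1 + 0, pc.2 - 1), (pc.1 + 1, pc.2 + 0), (pc.1 - 1, pc.2 - 1), (pc.1 - 1, pc.2 + 1)] : List (Int × Int))) (p := csf.contains)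
    simp only [List.length_cons, List.length_nil] at *
    omega
  by_cases hg : ([(pc.1 + 1, pc.2 + 1), (pc.1 + 1, pc.2 - 1), (pc.1 + 1, pc.2 + 0), (pc.1 + 0, pc.2 + 1),
       (pc.1 + 0, pc.2 - 1), (pc.1 + 1, pc.2 + 0), (pc.1 - 1, pc.2 - 1), (pc.1 - 1, pc.2 + 1)] : List (Int × Int)).all
        (fun c => csf.contains c) = true
  · rw [if_pos (hall.mpr hg), if_pos hg]
  · rw [if_neg (fun hc => hg (hall.mp hc)), if_neg hg]
    have hHS : (0 : Int) ≤ ((h.2 - h.1).natAbs : Int) := Int.natCast_nonneg _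
    have hVS : (0 : Int) ≤ ((v.2 - v.1).natAbs : Int) := Int.natCast_nonneg _
    -- B side: set build = fold of pvStep over the level rows
    rw [PySem.Set.ofList_eq_foldl, PySem.List.foldl_append_eq_flatMap, List.nil_append,
        List.foldl_flatMap]
    -- A side, cell by cell: inner loop = pvStep with the flattened canonical y-sequence
    have harithX : ∀ height : Int,
        ((if pc.1 + height - h.1 < pl.1 - ps.1 - 1 then [pc.1 + height - h.1] else [])
          ++ (if 2 ≤ pc.1 - height - h.1 then [pc.1 - height - h.1] else []))
        = pvRow (pc.1 - h.1) (pl.1 - ps.1 - 1) 2 height := by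
      intro height
      unfold pvRow
      rw [show pc.1 - h.1 + height = pc.1 + height - h.1 from by ring,
          show pc.1 - h.1 - height = pc.1 - height - h.1 from by ring]
    have harithY : ∀ length : Int,
        ((if pc.2 + length - v.1 < pl.2 - ps.2 - 1 then [pc.2 + length - v.1] else [])
          ++ (if 3 ≤ pc.2 - length - v.1 then [pc.2 - length - v.1] else []))
        = pvRow (pc.2 - v.1) (pl.2 - ps.2 - 1) 3 length := by
      intro length
      unfold pvRow
      rw [show pc.2 - v.1 + length = pc.2 + length - v.1 from by ring,
          show pc.2 - v.1 - length = pc.2 - length - v.1 from by ring]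
    have hAB : (fun (s : List (Int × Int)) (height : Int) =>
        (PySem.List.pyRange 0 (((v.2 - v.1).natAbs : Int) + 1) 1).foldl (fun s length =>
          let minus_height := pc.1 - height - h.1
          let plus_height := pc.1 + height - h.1
          let minus_length := pc.2 - length - v.1
          let plus_length := pc.2 + length - v.1
          let s := if pl.1 - ps.1 - 1 > plus_height ∧ pl.2 - ps.2 - 1 > plus_length then PySem.Set.add s (plus_height, plus_length) else s
          let s := if pl.2 - ps.2 - 1 > plus_length ∧ minus_height - 1 > 0 then PySem.Set.add s (minus_height, plus_length) else s
          let s := if pl.1 - ps.1 - 1 > plus_height ∧ minus_length - 2 > 0 then PySem.Set.add s (plus_height, minus_length) else s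
          let s := if minus_height - 1 > 0 ∧ minus_length - 2 > 0 then PySem.Set.add s (minus_height, minus_length) else s
          s) s)
        = (fun s height => pvStep
            ((PySem.List.pyRange 0 (((v.2 - v.1).natAbs : Int) + 1) 1).flatMap
              (pvRow (pc.2 - v.1) (pl.2 - ps.2 - 1) 3))
            s (pvRow (pc.1 - h.1) (pl.1 - ps.1 - 1) 2 height)) := by
      funext s height
      have hcellfun : (fun (s : List (Int × Int)) (length : Int) =>
          let minus_height := pc.1 - height - h.1
          let plus_height := pc.1 + height - h.1
          let minus_length := pc.2 - length - v.1
          let plus_length := pc.2 + length - v.1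
          let s := if pl.1 - ps.1 - 1 > plus_height ∧ pl.2 - ps.2 - 1 > plus_length then PySem.Set.add s (plus_height, plus_length) else s
          let s := if pl.2 - ps.2 - 1 > plus_length ∧ minus_height - 1 > 0 then PySem.Set.add s (minus_height, plus_length) else s
          let s := if pl.1 - ps.1 - 1 > plus_height ∧ minus_length - 2 > 0 then PySem.Set.add s (plus_height, minus_length) else s
          let s := if minus_height - 1 > 0 ∧ minus_length - 2 > 0 then PySem.Set.add s (minus_height, minus_length) else s
          s)
          = (fun s length => List.foldl PySem.Set.add s
              ((pvRow (pc.2 - v.1) (pl.2 - ps.2 - 1) 3 length).flatMap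
                (fun y => (pvRow (pc.1 - h.1) (pl.1 - ps.1 - 1) 2 height).map (fun x => (x, y))))) := by
        funext s length
        exact (pv_cell s (pc.1 + height - h.1) (pc.1 - height - h.1)
          (pc.2 + length - v.1) (pc.2 - length - v.1) (pl.1 - ps.1 - 1) (pl.2 - ps.2 - 1)).trans
          (by rw [harithX height, harithY length])
      rw [hcellfun, ← List.foldl_flatMap, ← List.flatMap_assoc]
      rfl
    rw [hAB]
    -- replace the y-sequence by B's deduplicated one
    have hTsplit : (PySem.List.pyRange 0 (((v.2 - v.1).natAbs : Int) + 1) 1).flatMap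
        (pvRow (pc.2 - v.1) (pl.2 - ps.2 - 1) 3)
        = ((if pc.2 - v.1 < pl.2 - ps.2 - 1 then [pc.2 - v.1] else [])
            ++ (if 3 ≤ pc.2 - v.1 then [pc.2 - v.1] else []))
          ++ (PySem.List.pyRange 1 (((v.2 - v.1).natAbs : Int) + 1) 1).flatMap
            (pvRow (pc.2 - v.1) (pl.2 - ps.2 - 1) 3) := by
      rw [PySem.List.pyRange_one_cons (by omega), List.flatMap_cons,
          show (0 : Int) + 1 = 1 from rfl]
      congr 1
      unfold pvRow
      rw [add_zero, sub_zero]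
    have hBsplit : (pvAxisLevels (pc.2 - v.1) (((v.2 - v.1).natAbs : Int)) (pl.2 - ps.2 - 1) 3).flatMap id
        = (if (pc.2 - v.1 < pl.2 - ps.2 - 1 ∨ 3 ≤ pc.2 - v.1) then [pc.2 - v.1] else [])
          ++ (PySem.List.pyRange 1 (((v.2 - v.1).natAbs : Int) + 1) 1).flatMap
            (pvRow (pc.2 - v.1) (pl.2 - ps.2 - 1) 3) := by
      unfold pvAxisLevels
      simp only [List.append_assoc, List.flatMap_append]
      have hT : ((PySem.List.pyRange 1 (min (min ((v.2 - v.1).natAbs : Int) (pl.2 - ps.2 - 1 - 1 - (pc.2 - v.1))) (min ((v.2 - v.1).natAbs : Int) (pc.2 - v.1 - 3)) + 1) 1).map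
              (fun d => [pc.2 - v.1 + d, pc.2 - v.1 - d])).flatMap id
            ++ (((PySem.List.pyRange (max (min (min ((v.2 - v.1).natAbs : Int) (pl.2 - ps.2 - 1 - 1 - (pc.2 - v.1))) (min ((v.2 - v.1).natAbs : Int) (pc.2 - v.1 - 3))) 0 + 1)
                (min ((v.2 - v.1).natAbs : Int) (pl.2 - ps.2 - 1 - 1 - (pc.2 - v.1)) + 1) 1).map (fun d => [pc.2 - v.1 + d])).flatMap id
            ++ ((PySem.List.pyRange (max (min (min ((v.2 - v.1).natAbs : Int) (pl.2 - ps.2 - 1 - 1 - (pc.2 - v.1))) (min ((v.2 - v.1).natAbs : Int) (pc.2 - v.1 - 3))) 0 + 1)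
                (min ((v.2 - v.1).natAbs : Int) (pc.2 - v.1 - 3) + 1) 1).map (fun d => [pc.2 - v.1 - d])).flatMap id)
          = (PySem.List.pyRange 1 (((v.2 - v.1).natAbs : Int) + 1) 1).flatMap
            (pvRow (pc.2 - v.1) (pl.2 - ps.2 - 1) 3) := by
        rw [← List.flatMap_append, ← List.flatMap_append,
            ← pv_zones (pc.2 - v.1) (pl.2 - ps.2 - 1) 3 (((v.2 - v.1).natAbs : Int)) _ _ _ hVS rfl rfl rfl,
            pv_flatten_filter_empty]
        simp [List.flatMap_map]
      rw [hT]
      congr 1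
      by_cases hc : pc.2 - v.1 < pl.2 - ps.2 - 1 ∨ 3 ≤ pc.2 - v.1
      · rw [if_pos hc, if_pos (by omega)]
        rfl
      · rw [if_neg hc, if_neg (by omega)]
        rfl
    have hyswap : (fun (s : List (Int × Int)) (height : Int) => pvStep
          ((PySem.List.pyRange 0 (((v.2 - v.1).natAbs : Int) + 1) 1).flatMap
            (pvRow (pc.2 - v.1) (pl.2 - ps.2 - 1) 3))
          s (pvRow (pc.1 - h.1) (pl.1 - ps.1 - 1) 2 height))
        = (fun s height => pvStep
            ((pvAxisLevels (pc.2 - v.1) (((v.2 - v.1).natAbs : Int)) (pl.2 - ps.2 - 1) 3).flatMap id)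
            s (pvRow (pc.1 - h.1) (pl.1 - ps.1 - 1) 2 height)) := by
      funext s height
      rw [hTsplit, hBsplit]
      exact pv_ys_step (pc.2 - v.1) (pl.2 - ps.2 - 1) 3 _ _ s
    rw [hyswap]
    exact pv_axis_fold _ (pv_step_nil _) (pv_step_dup _)
      (pc.1 - h.1) (pl.1 - ps.1 - 1) 2 (((h.2 - h.1).natAbs : Int)) hHS []
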